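-- pv_equiv track=rewrite | github.com/SimonPop/LinkIt | src/back/MysteryMaker.py | full_sentence
-- ===== SOURCE A (Python) =====
-- def full_sentence(start, end, context):
--     sentences = context.split('.')
--     count = 0
--     for sentence in sentences:
--         count += len(sentence)
--         if count >= start:
--             return sentence
--     return None
-- ===== SOURCE B (Python) =====
-- def full_sentence(start, end, context):
--     sentences = context.split('.')
--     cumsum = []
--     total = 0
--     for s in sentences:
--         total += len(s)
--         cumsum.append(total)
--     lo, hi = 0, len(cumsum)
--     while lo < hi:
--         mid = (lo + hi) // 2
--         if cumsum[mid] < start: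
--             lo = mid + 1
--         else:
--             hi = mid
--     if lo < len(sentences):
--         return sentences[lo]
--     return None
-- ===== Notes on version B (the rewrite author's own statement) =====
-- stated objective: alternative
-- what changed: Replaces the accumulate-and-compare linear scan with a prefix-sum table of sentence lengths followed by a bisect_left-style binary search for the first cumulative count >= start.
import Mathlib
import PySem

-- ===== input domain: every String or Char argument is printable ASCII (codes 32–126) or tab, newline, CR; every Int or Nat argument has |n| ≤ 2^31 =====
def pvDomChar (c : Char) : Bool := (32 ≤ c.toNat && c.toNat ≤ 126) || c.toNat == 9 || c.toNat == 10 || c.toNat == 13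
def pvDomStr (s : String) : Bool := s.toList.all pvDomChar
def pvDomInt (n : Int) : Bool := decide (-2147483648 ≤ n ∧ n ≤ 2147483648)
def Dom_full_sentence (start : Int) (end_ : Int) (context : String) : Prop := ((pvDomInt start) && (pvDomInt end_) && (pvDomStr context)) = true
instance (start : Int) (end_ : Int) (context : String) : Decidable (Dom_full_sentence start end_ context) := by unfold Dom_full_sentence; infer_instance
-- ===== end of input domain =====

-- B replaces A's accumulate-and-compare scan by a prefix-sum table plus a
-- bisect_left binary search; same return value everywhere (alternative, not faster).

-- ===== PORT A =====
-- the 'for sentence in sentences' loop with its early return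
def fsLoop (start : Int) (count : Int) : List String → Option String
  | [] => none
  | s :: rest =>
    let count' := count + PySem.Str.len s
    if start ≤ count' then some s else fsLoop start count' rest

def full_sentence (start : Int) (end_ : Int) (context : String) : Option String :=
  fsLoop start 0 ((PySem.Str.split? context ".").getD [])

-- ===== PORT B =====
-- the prefix-sum building loop (total += len(s); cumsum.append(total))
def fsCumsums (total : Int) : List String → List Int
  | [] => []
  | s :: rest =>
    let t := total + PySem.Str.len s
    t :: fsCumsums t rest

-- the bisect_left while-loop (lo, hi shrink until lo = hi)
def fsBisect (cum : List Int) (start : Int) (lo hi : Nat) : Nat :=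
  if lo < hi then
    let mid := (lo + hi) / 2
    if cum.getD mid 0 < start then fsBisect cum start (mid + 1) hi
    else fsBisect cum start lo mid
  else lo
termination_by hi - lo
decreasing_by all_goals omega

def full_sentence_alt (start : Int) (end_ : Int) (context : String) : Option String :=
  let sentences := (PySem.Str.split? context ".").getD []
  let cum := fsCumsums 0 sentences
  let lo := fsBisect cum start 0 cum.length
  if lo < sentences.length then some (sentences.getD lo "") else none

-- ===== PRECONDITION & SPEC =====
def Spec_full_sentence (start : Int) (end_ : Int) (context : String) (out : Option String) : Prop := out = full_sentence_alt start end_ context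
instance (start : Int) (end_ : Int) (context : String) (out : Option String) : Decidable (Spec_full_sentence start end_ context out) := by unfold Spec_full_sentence; infer_instance

-- ===== CLAIM (what is proved, stated in full; the proofs are below) =====
def Claim_equal_full_sentence : Prop := ∀ (start : Int) (end_ : Int) (context : String), Dom_full_sentence start end_ context → Spec_full_sentence start end_ context (full_sentence start end_ context)

-- ===== LEMMAS AND PROOFS =====

-- linear-search index realised by A's loop: first i with cumulative ≥ start, else length
def fsIdx (start : Int) (count : Int) : List String → Nat
  | [] => 0
  | s :: rest =>
    let count' := count + PySem.Str.len s
    if start ≤ count' then 0 else 1 + fsIdx start count' rest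

theorem fsIdx_le (start count : Int) (l : List String) : fsIdx start count l ≤ l.length := by
  induction l generalizing count with
  | nil => simp [fsIdx]
  | cons s rest ih =>
    simp only [fsIdx, List.length_cons]
    split
    · omega
    · have := ih (count + PySem.Str.len s); omega

theorem fsLoop_eq_idx (start count : Int) (l : List String) :
    fsLoop start count l =
      if fsIdx start count l < l.length then some (l.getD (fsIdx start count l) "") else none := by
  induction l generalizing count with
  | nil => simp [fsLoop, fsIdx]
  | cons s rest ih =>
    simp only [fsLoop, fsIdx, List.length_cons]
    split
    · simp
    · rw [ih]
      have hle := fsIdx_le start (count + PySem.Str.len s) rest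
      by_cases h : fsIdx start (count + PySem.Str.len s) rest < rest.length
      · rw [if_pos h,
          if_pos (show 1 + fsIdx start (count + PySem.Str.len s) rest < rest.length + 1 by omega),
          Nat.add_comm 1, List.getD_cons_succ]
      · rw [if_neg h,
          if_neg (show ¬ (1 + fsIdx start (count + PySem.Str.len s) rest < rest.length + 1) by omega)]

theorem fsCumsums_length (count : Int) (l : List String) :
    (fsCumsums count l).length = l.length := by
  induction l generalizing count with
  | nil => rfl
  | cons s rest ih => simp [fsCumsums, ih]

theorem fsLen_nonneg (s : String) : (0 : Int) ≤ PySem.Str.len s := by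
  simp [PySem.Str.len_eq]

-- entries of the table never go below the running total
theorem fsCumsums_ge (c : Int) (m : List String) (k : Nat) (hk : k < m.length) :
    c ≤ (fsCumsums c m).getD k 0 := by
  induction m generalizing c k with
  | nil => simp at hk
  | cons t r ih =>
    have ht := fsLen_nonneg t
    cases k with
    | zero => simp only [fsCumsums, List.getD_cons_zero]; omega
    | succ k' =>
      simp only [fsCumsums, List.getD_cons_succ]
      have := ih (c + PySem.Str.len t) k' (by simpa using Nat.lt_of_succ_lt_succ hk)
      omega

-- the table is below start strictly before fsIdx …
theorem fsIdx_lt_start (start count : Int) (l : List String) (i : Nat)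
    (hi : i < fsIdx start count l) :
    (fsCumsums count l).getD i 0 < start := by
  induction l generalizing count i with
  | nil => simp [fsIdx] at hi
  | cons s rest ih =>
    simp only [fsIdx] at hi
    split at hi
    · omega
    · rename_i h
      cases i with
      | zero => simp only [fsCumsums, List.getD_cons_zero]; omega
      | succ j =>
        simp only [fsCumsums, List.getD_cons_succ]
        exact ih (count + PySem.Str.len s) j (by omega)

-- … and at least start at fsIdx itself (when it is in range)
theorem fsIdx_ge_start (start count : Int) (l : List String)
    (h : fsIdx start count l < l.length) :
    start ≤ (fsCumsums count l).getD (fsIdx start count l) 0 := by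
  induction l generalizing count with
  | nil => simp at h
  | cons s rest ih =>
    simp only [fsIdx, List.length_cons] at h ⊢
    split
    · rename_i hle; simpa [fsCumsums] using hle
    · rename_i hle
      split at h
      · omega
      · simp only [fsCumsums, Nat.add_comm 1, List.getD_cons_succ]
        exact ih (count + PySem.Str.len s) (by omega)

-- the table is monotone (sentence lengths are nonnegative)
theorem fsCumsums_mono (count : Int) (l : List String) (i j : Nat)
    (hij : i ≤ j) (hj : j < l.length) :
    (fsCumsums count l).getD i 0 ≤ (fsCumsums count l).getD j 0 := by
  induction l generalizing count i j with
  | nil => simp at hj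
  | cons s rest ih =>
    cases j with
    | zero =>
      have : i = 0 := by omega
      simp [this]
    | succ j' =>
      cases i with
      | zero =>
        simp only [fsCumsums, List.getD_cons_zero, List.getD_cons_succ]
        exact fsCumsums_ge (count + PySem.Str.len s) rest j' (by simpa using Nat.lt_of_succ_lt_succ hj)
      | succ i' =>
        simp only [fsCumsums, List.getD_cons_succ]
        exact ih (count + PySem.Str.len s) i' j' (by omega) (by simpa using Nat.lt_of_succ_lt_succ hj)

-- bisect_left characterisation on a monotone table
theorem fsBisect_spec (cum : List Int) (start : Int)
    (hmono : ∀ a b, a ≤ b → b < cum.length → cum.getD a 0 ≤ cum.getD b 0) :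
    ∀ (n lo hi : Nat), hi - lo ≤ n → lo ≤ hi → hi ≤ cum.length →
      lo ≤ fsBisect cum start lo hi ∧ fsBisect cum start lo hi ≤ hi ∧
      (∀ i, lo ≤ i → i < fsBisect cum start lo hi → cum.getD i 0 < start) ∧
      (∀ i, fsBisect cum start lo hi ≤ i → i < hi → start ≤ cum.getD i 0) := by
  intro n
  induction n with
  | zero =>
    intro lo hi hn hlh hhi
    have : lo = hi := by omega
    subst this
    rw [fsBisect, if_neg (by omega)]
    exact ⟨le_refl _, le_refl _, fun i h1 h2 => by omega, fun i h1 h2 => by omega⟩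
  | succ n ih =>
    intro lo hi hn hlh hhi
    rw [fsBisect]
    by_cases hlt : lo < hi
    · rw [if_pos hlt]
      have hmidlt : (lo + hi) / 2 < hi := by omega
      have hmidge : lo ≤ (lo + hi) / 2 := by omega
      by_cases hc : cum.getD ((lo + hi) / 2) 0 < start
      · rw [if_pos hc]
        obtain ⟨h1, h2, h3, h4⟩ := ih ((lo + hi) / 2 + 1) hi (by omega) (by omega) hhi
        refine ⟨by omega, h2, ?_, h4⟩
        intro i hi1 hi2
        by_cases him : i ≤ (lo + hi) / 2
        · have := hmono i ((lo + hi) / 2) him (by omega)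
          omega
        · exact h3 i (by omega) hi2
      · rw [if_neg hc]
        obtain ⟨h1, h2, h3, h4⟩ := ih lo ((lo + hi) / 2) (by omega) (by omega) (by omega)
        refine ⟨h1, by omega, h3, ?_⟩
        intro i hi1 hi2
        by_cases him : i < (lo + hi) / 2
        · exact h4 i hi1 him
        · have := hmono ((lo + hi) / 2) i (by omega) (by omega)
          omega
    · rw [if_neg hlt]
      exact ⟨le_refl _, by omega, fun i h1 h2 => by omega, fun i h1 h2 => by omega⟩

-- ===== VERDICT (by name: the statement is the Claim_ definition above) =====
theorem full_sentence_spec : Claim_equal_full_sentence := by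
  intro start end_ context _
  unfold Spec_full_sentence full_sentence full_sentence_alt
  set sents := (PySem.Str.split? context ".").getD [] with hs
  set cum := fsCumsums 0 sents with hcum
  have hlen : cum.length = sents.length := fsCumsums_length 0 sents
  have hmono : ∀ a b, a ≤ b → b < cum.length → cum.getD a 0 ≤ cum.getD b 0 := by
    intro a b hab hb
    exact fsCumsums_mono 0 sents a b hab (by omega)
  obtain ⟨h1, h2, h3, h4⟩ :=
    fsBisect_spec cum start hmono cum.length 0 cum.length (by omega) (by omega) (le_refl _)
  set r := fsBisect cum start 0 cum.length with hr
  set L := fsIdx start 0 sents with hL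
  have hLle : L ≤ sents.length := fsIdx_le start 0 sents
  have hrL : r = L := by
    by_cases hlt : r < L
    · have hrlt : r < cum.length := by omega
      have ha := h4 r (le_refl _) hrlt
      have hb := fsIdx_lt_start start 0 sents r hlt
      rw [hcum] at ha
      omega
    · by_cases hgt : L < r
      · have ha := h3 L (by omega) hgt
        have hb := fsIdx_ge_start start 0 sents (by omega)
        rw [hcum, hL] at ha
        omega
      · omega
  rw [fsLoop_eq_idx, ← hL, ← hrL]
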